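-- pv_equiv track=rewrite | github.com/kroatoanjp/wct-payroll-report-generator | activity_report.py | _get_subpart_count
-- ===== SOURCE A (Python) =====
-- def _get_subpart_count(description):
--     desc_lines = description.split("\n")
--     subpart_line = [line for line in desc_lines if "Est. Subparts:" in line]
--     if len(subpart_line) == 0:
--         return 1
--     subpart_line = subpart_line[0]
--     subpart_count = subpart_line.split("Est. Subparts:")[1].strip()
--     return int(subpart_count)
-- ===== SOURCE B (Python) =====
-- def _get_subpart_count(description):
--     # Split on the marker itself: no line iteration, no filtering pass.
--     parts = description.split("Est. Subparts:")
--     if len(parts) == 1: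
--         return 1
--     return int(parts[1].split("\n")[0].strip())
-- ===== Notes on version B (the rewrite author's own statement) =====
-- stated objective: simpler
-- what changed: B splits the description on the marker 'Est. Subparts:' itself and truncates the second piece at the first newline, replacing A's split-into-lines plus filter-matching-lines plus per-line marker split.
import Mathlib
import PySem

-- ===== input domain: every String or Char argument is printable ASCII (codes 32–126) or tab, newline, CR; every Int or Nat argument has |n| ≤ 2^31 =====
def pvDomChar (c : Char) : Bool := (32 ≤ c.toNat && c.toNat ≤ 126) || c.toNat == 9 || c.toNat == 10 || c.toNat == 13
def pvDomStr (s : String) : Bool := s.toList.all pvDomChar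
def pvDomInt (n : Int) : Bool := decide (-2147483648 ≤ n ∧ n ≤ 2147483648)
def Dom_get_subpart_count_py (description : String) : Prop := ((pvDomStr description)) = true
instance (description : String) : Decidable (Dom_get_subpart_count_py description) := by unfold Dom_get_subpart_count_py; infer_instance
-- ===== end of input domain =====

-- B replaces A's split-into-lines + filter-matching-lines + per-line marker split by one split
-- on the marker itself (objective: simpler). Equivalence is about the return value; neither
-- program mutates its argument.

-- ===== PORT A =====
def get_subpart_count_py (description : String) : Int :=
  let desc_lines := PySem.Chars.splitOn description.toList "\n".toList
  let subpart_line := desc_lines.filter (fun line => PySem.Chars.isIn "Est. Subparts:".toList line)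
  if subpart_line.length = 0 then 1
  else
    let line := (PySem.List.pyGet? subpart_line 0).getD []
    let t := (PySem.List.pyGet? (PySem.Chars.splitOn line "Est. Subparts:".toList) 1).getD []
    (PySem.Int.ofChars? (PySem.Chars.strip t)).getD 0  -- int(...): Pre_ excludes the ValueError inputs

-- ===== PORT B =====
def get_subpart_count_py_alt (description : String) : Int :=
  let parts := PySem.Chars.splitOn description.toList "Est. Subparts:".toList
  if parts.length = 1 then 1
  else
    let p := (PySem.List.pyGet? parts 1).getD []
    let line := (PySem.List.pyGet? (PySem.Chars.splitOn p "\n".toList) 0).getD []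
    (PySem.Int.ofChars? (PySem.Chars.strip line)).getD 0  -- int(...): Pre_ excludes the ValueError inputs

-- ===== PRECONDITION & SPEC =====
-- the text after the first marker occurrence, cut at the next marker/newline (what both programs feed to int())
def pvExtract (description : String) : Option (List Char) :=
  match PySem.Chars.splitOn description.toList "Est. Subparts:".toList with
  | _ :: p :: _ => some ((PySem.Chars.splitOn p "\n".toList).headD [])
  | _ => none

-- Pre_ excludes exactly the inputs on which A raises ValueError: a marker line is present but the
-- text after the marker does not parse as an int.
def Pre_get_subpart_count_py (description : String) : Prop :=
  ((pvExtract description).all fun t => (PySem.Int.ofChars? (PySem.Chars.strip t)).isSome) = true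
instance (description : String) : Decidable (Pre_get_subpart_count_py description) := by
  unfold Pre_get_subpart_count_py; infer_instance

def pvWitness_get_subpart_count_py : String := "Est. Subparts: 3"

def Spec_get_subpart_count_py (description : String) (out : Int) : Prop := out = get_subpart_count_py_alt description
instance (description : String) (out : Int) : Decidable (Spec_get_subpart_count_py description out) := by unfold Spec_get_subpart_count_py; infer_instance

-- ===== CLAIM (what is proved, stated in full; the proofs are below) =====
def Claim_equal_get_subpart_count_py : Prop := ∀ (description : String), Dom_get_subpart_count_py description → Pre_get_subpart_count_py description → Spec_get_subpart_count_py description (get_subpart_count_py description)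

-- ===== LEMMAS AND PROOFS =====

-- a clean structural version of Python's s.split(sep) for a nonempty sep a :: sp
def pvSplit (a : Char) (sp : List Char) : List Char → List (List Char)
  | [] => [[]]
  | c :: rest =>
    if (a :: sp).isPrefixOf (c :: rest) then
      [] :: pvSplit a sp (rest.drop sp.length)
    else
      match pvSplit a sp rest with
      | [] => [[c]]
      | h :: t => (c :: h) :: t
termination_by s => s.length
decreasing_by
  · simpa using Nat.lt_succ_of_le (List.length_drop_le ..)
  · simp

theorem pvSplit_nil (a : Char) (sp : List Char) : pvSplit a sp [] = [[]] := by
  rw [pvSplit]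

theorem pvSplit_cons (a : Char) (sp : List Char) (c : Char) (rest : List Char) :
    pvSplit a sp (c :: rest) =
      if (a :: sp).isPrefixOf (c :: rest) then
        [] :: pvSplit a sp (rest.drop sp.length)
      else
        match pvSplit a sp rest with
        | [] => [[c]]
        | h :: t => (c :: h) :: t := by
  rw [pvSplit]

-- the first piece of pvSplit: the input up to the first occurrence of a :: sp
def pvUpTo (a : Char) (sp : List Char) : List Char → List Char
  | [] => []
  | c :: rest =>
    if (a :: sp).isPrefixOf (c :: rest) then []
    else c :: pvUpTo a sp rest

theorem pvUpTo_nil (a : Char) (sp : List Char) : pvUpTo a sp [] = [] := rfl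

theorem pvUpTo_cons (a : Char) (sp : List Char) (c : Char) (rest : List Char) :
    pvUpTo a sp (c :: rest) =
      if (a :: sp).isPrefixOf (c :: rest) then [] else c :: pvUpTo a sp rest := rfl

theorem pvSplit_head (a : Char) (sp : List Char) (s : List Char) :
    ∃ t, pvSplit a sp s = pvUpTo a sp s :: t := by
  induction s with
  | nil => exact ⟨[], by rw [pvSplit_nil, pvUpTo_nil]⟩
  | cons c rest ih =>
      by_cases h : (a :: sp).isPrefixOf (c :: rest)
      · rw [pvSplit_cons, pvUpTo_cons, if_pos h, if_pos h]
        exact ⟨_, rfl⟩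
      · obtain ⟨t, ht⟩ := ih
        rw [pvSplit_cons, pvUpTo_cons, if_neg h, if_neg h, ht]
        exact ⟨t, rfl⟩

-- pvUpTo is a prefix of the input
theorem pvUpTo_prefix (a : Char) (sp : List Char) (s : List Char) :
    pvUpTo a sp s <+: s := by
  induction s with
  | nil => simp [pvUpTo_nil]
  | cons c rest ih =>
      rw [pvUpTo_cons]
      by_cases h : (a :: sp).isPrefixOf (c :: rest)
      · rw [if_pos h]; exact List.nil_prefix
      · rw [if_neg h]; exact List.cons_prefix_cons.mpr ⟨rfl, ih⟩

-- the fuel-based PySem splitter equals pvSplit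
theorem splitOn_go_eq (a : Char) (sp : List Char) :
    ∀ (fuel : Nat) (l cur : List Char) (acc : List (List Char)), l.length ≤ fuel →
      PySem.Chars.splitOn.go (a :: sp) fuel l cur acc =
        acc.reverse ++ (match pvSplit a sp l with
          | [] => [cur.reverse]
          | h :: t => (cur.reverse ++ h) :: t) := by
  intro fuel
  induction fuel with
  | zero =>
      intro l cur acc hl
      have hl0 : l = [] := List.eq_nil_of_length_eq_zero (Nat.le_zero.mp hl)
      subst hl0
      rw [PySem.Chars.splitOn.go.eq_def]
      simp [pvSplit_nil]
  | succ f ih =>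
      intro l cur acc hl
      match l with
      | [] =>
          rw [PySem.Chars.splitOn.go.eq_def]
          dsimp only
          simp [pvSplit_nil]
      | c :: rest =>
          rw [PySem.Chars.splitOn.go.eq_def]
          dsimp only
          by_cases h : (a :: sp).isPrefixOf (c :: rest)
          · rw [if_pos h]
            have hlen : (List.drop (a :: sp).length (c :: rest)).length ≤ f := by
              simp only [List.length_drop, List.length_cons] at hl ⊢
              omega
            rw [ih _ _ _ hlen]
            rw [pvSplit_cons, if_pos h]
            have hd : List.drop (a :: sp).length (c :: rest) = rest.drop sp.length := by
              simp [List.drop_succ_cons]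
            obtain ⟨t, ht⟩ := pvSplit_head a sp (rest.drop sp.length)
            rw [hd, ht]
            simp
          · rw [if_neg h]
            have hlen : rest.length ≤ f := by
              simp only [List.length_cons] at hl; omega
            rw [ih _ _ _ hlen]
            rw [pvSplit_cons, if_neg h]
            obtain ⟨t, ht⟩ := pvSplit_head a sp rest
            rw [ht]
            simp

theorem splitOn_eq_pvSplit (a : Char) (sp : List Char) (s : List Char) :
    PySem.Chars.splitOn s (a :: sp) = pvSplit a sp s := by
  rw [PySem.Chars.splitOn, splitOn_go_eq a sp (s.length + 1) s [] [] (by omega)]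
  obtain ⟨t, ht⟩ := pvSplit_head a sp s
  rw [ht]; simp

-- abbreviations for the two separators
def pvM : List Char := ['E','s','t','.',' ','S','u','b','p','a','r','t','s',':']
def pvMtl : List Char := ['s','t','.',' ','S','u','b','p','a','r','t','s',':']

theorem pvM_eq : pvM = 'E' :: pvMtl := rfl
theorem pvM_toList : ("Est. Subparts:".toList : List Char) = pvM := by decide
theorem pvM_all : pvM.all (· != '\n') = true := rfl
theorem pvM_no_newline : ∀ x ∈ pvM, x ≠ '\n' := by
  have h := pvM_all
  rw [List.all_eq_true] at h
  intro x hx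
  simpa using h x hx

-- if M is a prefix of s and M has no newline, M is a prefix of the first line of s
theorem prefix_pvUpTo (M : List Char) (hM : ∀ x ∈ M, x ≠ '\n') :
    ∀ s : List Char, M <+: s → M <+: pvUpTo '\n' [] s := by
  induction M with
  | nil => intro s _; exact List.nil_prefix
  | cons m M2 ih =>
      intro s hpre
      obtain ⟨u, hu⟩ := hpre
      subst hu
      have hm : m ≠ '\n' := hM m (by simp)
      rw [show (m :: M2) ++ u = m :: (M2 ++ u) from rfl, pvUpTo_cons, if_neg]
      · exact List.cons_prefix_cons.mpr ⟨rfl, ih (fun x hx => hM x (by simp [hx])) _ ⟨u, rfl⟩⟩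
      · simp only [List.isPrefixOf_iff_prefix]
        intro hc
        exact hm (List.cons_prefix_cons.mp hc).1.symm

-- dropping |M| from the first line = first line of the drop, when M (newline-free) is a prefix
theorem drop_pvUpTo (M : List Char) (hM : ∀ x ∈ M, x ≠ '\n') :
    ∀ s : List Char, M <+: s →
      (pvUpTo '\n' [] s).drop M.length = pvUpTo '\n' [] (s.drop M.length) := by
  induction M with
  | nil => intro s _; simp
  | cons m M2 ih =>
      intro s hpre
      obtain ⟨u, hu⟩ := hpre
      subst hu
      have hm : m ≠ '\n' := hM m (by simp)
      rw [show (m :: M2) ++ u = m :: (M2 ++ u) from rfl, pvUpTo_cons, if_neg]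
      · simpa using ih (fun x hx => hM x (by simp [hx])) _ ⟨u, rfl⟩
      · simp only [List.isPrefixOf_iff_prefix]
        intro hc
        exact hm (List.cons_prefix_cons.mp hc).1.symm

-- cutting at the first marker and cutting at the first newline commute
theorem pvUpTo_comm (a : Char) (sp : List Char) (hM : ∀ x ∈ a :: sp, x ≠ '\n') :
    ∀ s : List Char, pvUpTo '\n' [] (pvUpTo a sp s) = pvUpTo a sp (pvUpTo '\n' [] s) := by
  intro s
  induction s with
  | nil => simp [pvUpTo_nil]
  | cons c r ih =>
      by_cases h : (a :: sp).isPrefixOf (c :: r)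
      · rw [pvUpTo_cons, if_pos h, pvUpTo_nil]
        have h' : (a :: sp) <+: pvUpTo '\n' [] (c :: r) :=
          prefix_pvUpTo _ hM _ (List.isPrefixOf_iff_prefix.mp h)
        obtain ⟨v, hv⟩ := h'
        rw [← hv, show (a :: sp) ++ v = a :: (sp ++ v) from rfl, pvUpTo_cons, if_pos]
        rw [List.isPrefixOf_iff_prefix]
        exact ⟨v, rfl⟩
      · by_cases hc : c = '\n'
        · subst hc
          rw [pvUpTo_cons, if_neg h]
          rw [show pvUpTo '\n' [] ('\n' :: r) = [] by
            rw [pvUpTo_cons, if_pos (by simp [List.isPrefixOf])]]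
          rw [show pvUpTo '\n' [] ('\n' :: pvUpTo a sp r) = [] by
            rw [pvUpTo_cons, if_pos (by simp [List.isPrefixOf])]]
          rw [pvUpTo_nil]
        · have hC : ¬ ['\n'].isPrefixOf (c :: r) := by
            simp only [List.isPrefixOf_iff_prefix]
            intro hpc; exact hc (List.cons_prefix_cons.mp hpc).1.symm
          have hC2 : ¬ ['\n'].isPrefixOf (c :: pvUpTo a sp r) := by
            simp only [List.isPrefixOf_iff_prefix]
            intro hpc; exact hc (List.cons_prefix_cons.mp hpc).1.symm
          have hM2 : ¬ (a :: sp).isPrefixOf (c :: pvUpTo '\n' [] r) := by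
            simp only [List.isPrefixOf_iff_prefix] at h ⊢
            intro hpc
            exact h (hpc.trans (List.cons_prefix_cons.mpr ⟨rfl, pvUpTo_prefix '\n' [] r⟩))
          rw [pvUpTo_cons, if_neg h]
          rw [show pvUpTo '\n' [] (c :: pvUpTo a sp r) = c :: pvUpTo '\n' [] (pvUpTo a sp r) by
            rw [pvUpTo_cons, if_neg hC2]]
          rw [show pvUpTo '\n' [] (c :: r) = c :: pvUpTo '\n' [] r by
            rw [pvUpTo_cons, if_neg hC]]
          rw [pvUpTo_cons, if_neg hM2, ih]

-- the value fed to int() on A's side / B's side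
def pvEA (s : List Char) : Option (List Char) :=
  match (pvSplit '\n' [] s).filter (fun l => PySem.Chars.isIn pvM l) with
  | [] => none
  | L :: _ => some ((pvSplit 'E' pvMtl L)[1]?.getD [])

def pvEB (s : List Char) : Option (List Char) :=
  match pvSplit 'E' pvMtl s with
  | _ :: p :: _ => some (pvUpTo '\n' [] p)
  | _ => none

theorem pvEA_eq_pvEB (s : List Char) : pvEA s = pvEB s := by
  induction s with
  | nil =>
      have h0 : PySem.Chars.isIn pvM [] = false := by decide
      simp [pvEA, pvEB, pvSplit_nil, h0]
  | cons c r ih =>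
      by_cases h : pvM.isPrefixOf (c :: r)
      · -- the marker starts right here: both sides resolve directly
        have hpre : pvM <+: c :: r := List.isPrefixOf_iff_prefix.mp h
        have hL0 : pvM <+: pvUpTo '\n' [] (c :: r) := prefix_pvUpTo pvM pvM_no_newline _ hpre
        have hlenM : pvM.length = pvMtl.length + 1 := by rw [pvM_eq]; rfl
        -- B side
        have hBsplit : pvSplit 'E' pvMtl (c :: r) = [] :: pvSplit 'E' pvMtl (r.drop pvMtl.length) := by
          rw [pvSplit_cons, if_pos (pvM_eq ▸ h)]
        obtain ⟨tB, htB⟩ := pvSplit_head 'E' pvMtl (r.drop pvMtl.length)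
        -- A side: first line starts with the marker
        obtain ⟨tN, htN⟩ := pvSplit_head '\n' [] (c :: r)
        have hIn : PySem.Chars.isIn pvM (pvUpTo '\n' [] (c :: r)) = true := by
          rw [PySem.Chars.isIn_iff_infix]; exact hL0.isInfix
        obtain ⟨uL, huL⟩ := hL0
        have hdropL : (pvUpTo '\n' [] (c :: r)).drop pvM.length = uL := by
          rw [← huL, List.drop_left]
        have hLsplit : pvSplit 'E' pvMtl (pvUpTo '\n' [] (c :: r)) =
            [] :: pvSplit 'E' pvMtl uL := by
          rw [← huL, pvM_eq, show ('E' :: pvMtl) ++ uL = 'E' :: (pvMtl ++ uL) from rfl]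
          rw [pvSplit_cons, if_pos]
          · rw [List.drop_left]
          · rw [List.isPrefixOf_iff_prefix]
            exact ⟨uL, rfl⟩
        obtain ⟨tL, htL⟩ := pvSplit_head 'E' pvMtl uL
        rw [pvEA, pvEB, htN, hBsplit, htB]
        rw [List.filter_cons_of_pos hIn]
        dsimp only
        rw [hLsplit, htL]
        simp only [List.getElem?_cons_succ, List.getElem?_cons_zero, Option.getD_some]
        congr 1
        have huL' : uL = pvUpTo '\n' [] ((c :: r).drop pvM.length) := by
          rw [← hdropL, drop_pvUpTo pvM pvM_no_newline _ hpre]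
        have hdrs : (c :: r).drop pvM.length = r.drop pvMtl.length := by
          rw [hlenM, List.drop_succ_cons]
        rw [huL', hdrs]
        rw [pvUpTo_comm 'E' pvMtl (pvM_eq ▸ pvM_no_newline)]
      · -- the marker does not start here: both sides reduce to the tail
        have hEB : pvEB (c :: r) = pvEB r := by
          obtain ⟨t, ht⟩ := pvSplit_head 'E' pvMtl r
          rw [pvEB, pvEB, pvSplit_cons, if_neg (pvM_eq ▸ h), ht]
          match t with
          | [] => rfl
          | p :: t' => rfl
        rw [hEB, ← ih]
        by_cases hc : c = '\n'
        · subst hc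
          have hsplit : pvSplit '\n' [] ('\n' :: r) = [] :: pvSplit '\n' [] r := by
            rw [pvSplit_cons, if_pos (by simp [List.isPrefixOf])]
            simp
          have h0 : PySem.Chars.isIn pvM [] = false := by decide
          rw [pvEA, pvEA, hsplit, List.filter_cons_of_neg (by simp [h0])]
        · have hC : ¬ ['\n'].isPrefixOf (c :: r) := by
            simp only [List.isPrefixOf_iff_prefix]
            intro hpc; exact hc (List.cons_prefix_cons.mp hpc).1.symm
          obtain ⟨t', ht'⟩ := pvSplit_head '\n' [] r
          have hsplit : pvSplit '\n' [] (c :: r) = (c :: pvUpTo '\n' [] r) :: t' := by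
            rw [pvSplit_cons, if_neg hC, ht']
          have hnp : ¬ pvM <+: c :: pvUpTo '\n' [] r := fun hpc =>
            h (List.isPrefixOf_iff_prefix.mpr
              (hpc.trans (List.cons_prefix_cons.mpr ⟨rfl, pvUpTo_prefix '\n' [] r⟩)))
          have hIn : PySem.Chars.isIn pvM (c :: pvUpTo '\n' [] r) =
              PySem.Chars.isIn pvM (pvUpTo '\n' [] r) := by
            by_cases hi : PySem.Chars.isIn pvM (pvUpTo '\n' [] r) = true
            · rw [hi, PySem.Chars.isIn_iff_infix]
              exact ((PySem.Chars.isIn_iff_infix _ _).mp hi).trans (List.suffix_cons c _).isInfix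
            · rw [Bool.not_eq_true] at hi
              rw [hi, PySem.Chars.isIn_eq_false_iff]
              intro hinf
              rcases List.infix_cons_iff.mp hinf with hp | h2
              · exact hnp hp
              · exact ((PySem.Chars.isIn_eq_false_iff _ _).mp hi) h2
          rw [pvEA, pvEA, hsplit, ht']
          by_cases hi : PySem.Chars.isIn pvM (pvUpTo '\n' [] r) = true
          · rw [List.filter_cons_of_pos (by rw [hIn]; exact hi), List.filter_cons_of_pos hi]
            dsimp only
            congr 1
            obtain ⟨tM, htM⟩ := pvSplit_head 'E' pvMtl (pvUpTo '\n' [] r)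
            rw [show pvSplit 'E' pvMtl (c :: pvUpTo '\n' [] r) =
                (c :: pvUpTo 'E' pvMtl (pvUpTo '\n' [] r)) :: tM by
              rw [pvSplit_cons, if_neg (fun hh => hnp (pvM_eq ▸ List.isPrefixOf_iff_prefix.mp hh)),
                htM], htM]
            simp
          · rw [Bool.not_eq_true] at hi
            rw [List.filter_cons_of_neg (by simp [hIn, hi]), List.filter_cons_of_neg (by simp [hi])]

-- port A computes pvEA, port B computes pvEB
theorem portA_eq (d : String) :
    get_subpart_count_py d = (match pvEA d.toList with
      | none => 1
      | some t => (PySem.Int.ofChars? (PySem.Chars.strip t)).getD 0) := by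
  simp only [get_subpart_count_py]
  rw [show ("\n".toList : List Char) = '\n' :: [] from rfl,
    splitOn_eq_pvSplit '\n' [] d.toList]
  rw [pvM_toList]
  rw [pvEA]
  obtain ⟨F, hF⟩ : ∃ F, (pvSplit '\n' [] d.toList).filter (fun l => PySem.Chars.isIn pvM l) = F :=
    ⟨_, rfl⟩
  rw [hF]
  match F with
  | [] => simp
  | L :: F' =>
      rw [if_neg (by simp)]
      have h0 : (PySem.List.pyGet? (L :: F') (0 : Int)).getD ([] : List Char) = L := by
        rw [show ((0 : Int)) = ((0 : Nat) : Int) from rfl, PySem.List.pyGet?_natCast]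
        rfl
      rw [h0]
      rw [show PySem.Chars.splitOn L pvM = pvSplit 'E' pvMtl L by
        rw [pvM_eq, splitOn_eq_pvSplit]]
      rw [show ((1 : Int)) = ((1 : Nat) : Int) from rfl, PySem.List.pyGet?_natCast]

theorem portB_eq (d : String) :
    get_subpart_count_py_alt d = (match pvEB d.toList with
      | none => 1
      | some t => (PySem.Int.ofChars? (PySem.Chars.strip t)).getD 0) := by
  simp only [get_subpart_count_py_alt]
  rw [pvM_toList]
  rw [show PySem.Chars.splitOn d.toList pvM = pvSplit 'E' pvMtl d.toList by
    rw [pvM_eq, splitOn_eq_pvSplit]]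
  rw [pvEB]
  obtain ⟨t, ht⟩ := pvSplit_head 'E' pvMtl d.toList
  rw [ht]
  match t with
  | [] => simp
  | p :: t' =>
      rw [if_neg (by simp)]
      rw [show ((1 : Int)) = ((1 : Nat) : Int) from rfl, PySem.List.pyGet?_natCast]
      simp only [List.getElem?_cons_succ, List.getElem?_cons_zero, Option.getD_some]
      rw [show ("\n".toList : List Char) = '\n' :: [] from rfl, splitOn_eq_pvSplit '\n' [] p]
      obtain ⟨tp, htp⟩ := pvSplit_head '\n' [] p
      rw [htp]
      rw [show ((0 : Int)) = ((0 : Nat) : Int) from rfl, PySem.List.pyGet?_natCast]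
      rfl

-- ===== VERDICT (by name: the statement is the Claim_ definition above) =====
theorem get_subpart_count_py_spec : Claim_equal_get_subpart_count_py := by
  intro d _ _
  unfold Spec_get_subpart_count_py
  rw [portA_eq, portB_eq, pvEA_eq_pvEB]
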